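-- pv_equiv track=rewrite | github.com/narratorai/codebase | mavis/core/utils.py | get_dataset_summary
-- ===== SOURCE A (Python) =====
-- def get_dataset_summary(dataset):
--     name = []
--     for a in dataset["activities"]:
--         if a["kind"] == "limiting":
--             name.insert(0, a["occurrence"])
--             name.insert(1, a.get("name") or "NO NAME")
--         else:
--             name.append(a.get("relationship_slug") or "NO RELATIONSHIP")
--             name.append(a.get("name") or "NO NAME")
--
--     # TODO: Add all the filters
--     return " ".join(name)
-- ===== SOURCE B (Python) =====
-- def get_dataset_summary(dataset):
--     lim = []
--     rest = []
--     for a in dataset["activities"]: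
--         if a["kind"] == "limiting":
--             lim.append((a["occurrence"], a.get("name") or "NO NAME"))
--         else:
--             rest.append(a.get("relationship_slug") or "NO RELATIONSHIP")
--             rest.append(a.get("name") or "NO NAME")
--     out = []
--     for occ, nm in reversed(lim):
--         out.append(occ)
--         out.append(nm)
--     out.extend(rest)
--     return " ".join(out)
-- ===== Notes on version B (the rewrite author's own statement) =====
-- stated objective: simpler
-- what changed: Replaces A's repeated insert(0)/insert(1) front-splicing into one growing list with a single-pass partition into limiting pairs and a rest token list, then flattens the limiting pairs in reverse to reproduce the front-insertion order.
import Mathlib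
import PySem

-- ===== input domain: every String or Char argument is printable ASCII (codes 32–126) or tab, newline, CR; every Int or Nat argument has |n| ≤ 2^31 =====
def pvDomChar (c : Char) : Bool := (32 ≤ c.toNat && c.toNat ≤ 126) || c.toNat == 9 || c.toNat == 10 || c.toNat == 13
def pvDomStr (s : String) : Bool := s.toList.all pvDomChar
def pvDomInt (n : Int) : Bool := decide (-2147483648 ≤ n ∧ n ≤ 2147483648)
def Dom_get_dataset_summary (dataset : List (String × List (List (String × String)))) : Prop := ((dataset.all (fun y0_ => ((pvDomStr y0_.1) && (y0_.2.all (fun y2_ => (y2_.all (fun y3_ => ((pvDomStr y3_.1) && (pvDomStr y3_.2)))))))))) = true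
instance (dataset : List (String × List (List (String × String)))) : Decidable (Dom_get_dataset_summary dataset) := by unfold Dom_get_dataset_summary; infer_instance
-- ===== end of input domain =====

-- B replaces A's insert-at-front list surgery by a one-pass two-bucket partition
-- (limiting pairs / rest tokens) followed by a reverse flatten; objective: simpler.


-- shared accessors for an activity dict (assoc list, first-match lookup)
-- `a.get(k) or dflt` : None or "" (falsy) fall back to dflt
def pvGetOr (a : List (String × String)) (k : String) (dflt : String) : String :=
  match (PySem.Dict.mk a).get? k with
  | none => dflt
  | some s => if s.toList = [] then dflt else s

-- a["kind"] / a["occurrence"]; Pre_ guarantees the key is present, so getD never hits its default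
def pvGetKey (a : List (String × String)) (k : String) : String :=
  (PySem.Dict.mk a).getD k ""

-- ===== PORT A =====
-- the loop: name.insert(0, occ); name.insert(1, nm)  ⟹  name := occ :: nm :: name
def pvALoop : List (List (String × String)) → List String → List String
  | [], name => name
  | a :: as, name =>
    if pvGetKey a "kind" = "limiting" then
      pvALoop as (pvGetKey a "occurrence" :: pvGetOr a "name" "NO NAME" :: name)
    else
      pvALoop as (name ++ [pvGetOr a "relationship_slug" "NO RELATIONSHIP", pvGetOr a "name" "NO NAME"])

def get_dataset_summary (dataset : List (String × List (List (String × String)))) : String :=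
  PySem.Str.join " " (pvALoop ((PySem.Dict.mk dataset).getD "activities" []) [])

-- ===== PORT B =====
def get_dataset_summary_alt (dataset : List (String × List (List (String × String)))) : String :=
  let p := ((PySem.Dict.mk dataset).getD "activities" []).foldl
    (fun (p : List (String × String) × List String) a =>
      if pvGetKey a "kind" = "limiting" then
        (p.1 ++ [(pvGetKey a "occurrence", pvGetOr a "name" "NO NAME")], p.2)
      else
        (p.1, p.2 ++ [pvGetOr a "relationship_slug" "NO RELATIONSHIP", pvGetOr a "name" "NO NAME"]))
    ([], [])
  let out := p.1.reverse.foldl (fun o q => o ++ [q.1, q.2]) []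
  PySem.Str.join " " (out ++ p.2)

-- ===== PRECONDITION & SPEC =====
-- Pre_ excludes exactly the inputs where Python A raises KeyError: a missing "activities" key,
-- an activity without "kind", or a limiting activity without "occurrence".
def Pre_get_dataset_summary (dataset : List (String × List (List (String × String)))) : Prop :=
  ((PySem.Dict.mk dataset).get? "activities").isSome = true ∧
  ∀ a ∈ (PySem.Dict.mk dataset).getD "activities" [],
    ((PySem.Dict.mk a).get? "kind").isSome = true ∧
    (pvGetKey a "kind" = "limiting" → ((PySem.Dict.mk a).get? "occurrence").isSome = true)
instance (dataset : List (String × List (List (String × String)))) : Decidable (Pre_get_dataset_summary dataset) := by unfold Pre_get_dataset_summary; infer_instance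

def pvWitness_get_dataset_summary : (List (String × List (List (String × String)))) :=
  [("activities", [[("kind", "limiting"), ("occurrence", "first")],
                   [("kind", "append"), ("name", "bob")],
                   [("kind", "limiting"), ("occurrence", "second"), ("name", "")]])]

def Spec_get_dataset_summary (dataset : List (String × List (List (String × String)))) (out : String) : Prop := out = get_dataset_summary_alt dataset
instance (dataset : List (String × List (List (String × String)))) (out : String) : Decidable (Spec_get_dataset_summary dataset out) := by unfold Spec_get_dataset_summary; infer_instance

-- ===== CLAIM (what is proved, stated in full; the proofs are below) =====
def Claim_equal_get_dataset_summary : Prop := ∀ (dataset : List (String × List (List (String × String)))), Dom_get_dataset_summary dataset → Pre_get_dataset_summary dataset → Spec_get_dataset_summary dataset (get_dataset_summary dataset)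

-- ===== LEMMAS AND PROOFS =====

-- the flattened tokens contributed by the limiting activities, in A's final (reversed) order
def pvLimFlat : List (List (String × String)) → List String
  | [] => []
  | a :: as =>
    if pvGetKey a "kind" = "limiting" then
      pvLimFlat as ++ [pvGetKey a "occurrence", pvGetOr a "name" "NO NAME"]
    else pvLimFlat as

-- the limiting pairs in source order (B's first bucket)
def pvLimPairs : List (List (String × String)) → List (String × String)
  | [] => []
  | a :: as =>
    if pvGetKey a "kind" = "limiting" then
      (pvGetKey a "occurrence", pvGetOr a "name" "NO NAME") :: pvLimPairs as
    else pvLimPairs as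

-- the tokens of the non-limiting activities, in source order (B's second bucket)
def pvRestFlat : List (List (String × String)) → List String
  | [] => []
  | a :: as =>
    if pvGetKey a "kind" = "limiting" then pvRestFlat as
    else pvGetOr a "relationship_slug" "NO RELATIONSHIP" :: pvGetOr a "name" "NO NAME" :: pvRestFlat as

theorem pvALoop_eq (as : List (List (String × String))) :
    ∀ name, pvALoop as name = pvLimFlat as ++ name ++ pvRestFlat as := by
  induction as with
  | nil => intro name; simp [pvALoop, pvLimFlat, pvRestFlat]
  | cons a as ih =>
    intro name
    by_cases h : pvGetKey a "kind" = "limiting" <;>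
      simp [pvALoop, pvLimFlat, pvRestFlat, h, ih]

theorem pvBFold_eq (as : List (List (String × String))) :
    ∀ (l : List (String × String)) (r : List String),
      as.foldl (fun (p : List (String × String) × List String) a =>
        if pvGetKey a "kind" = "limiting" then
          (p.1 ++ [(pvGetKey a "occurrence", pvGetOr a "name" "NO NAME")], p.2)
        else
          (p.1, p.2 ++ [pvGetOr a "relationship_slug" "NO RELATIONSHIP", pvGetOr a "name" "NO NAME"]))
        (l, r)
      = (l ++ pvLimPairs as, r ++ pvRestFlat as) := by
  induction as with
  | nil => intro l r; simp [pvLimPairs, pvRestFlat]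
  | cons a as ih =>
    intro l r
    by_cases h : pvGetKey a "kind" = "limiting" <;>
      simp [pvLimPairs, pvRestFlat, h, ih]

theorem pvRevFlat (as : List (List (String × String))) :
    (pvLimPairs as).reverse.foldl (fun o q => o ++ [q.1, q.2]) [] = pvLimFlat as := by
  have hf : ∀ (l : List (String × String)) (o : List String),
      l.foldl (fun o q => o ++ [q.1, q.2]) o = o ++ l.flatMap (fun q => [q.1, q.2]) := by
    intro l
    induction l with
    | nil => simp
    | cons q l ih => intro o; simp [ih]
  rw [hf]
  simp only [List.nil_append]
  induction as with
  | nil => simp [pvLimPairs, pvLimFlat]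
  | cons a as ih =>
    by_cases h : pvGetKey a "kind" = "limiting"
    · rw [pvLimPairs, pvLimFlat, if_pos h, if_pos h, List.reverse_cons,
        List.flatMap_append, ih]
      simp
    · rw [pvLimPairs, pvLimFlat, if_neg h, if_neg h, ih]

-- ===== VERDICT (by name: the statement is the Claim_ definition above) =====
theorem get_dataset_summary_spec : Claim_equal_get_dataset_summary := by
  intro dataset _ _
  unfold Spec_get_dataset_summary get_dataset_summary get_dataset_summary_alt
  rw [pvALoop_eq, pvBFold_eq]
  simp only [List.nil_append, List.append_nil]
  rw [pvRevFlat]
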